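-- pv_equiv track=rewrite | github.com/zirui-yuan/CoLLMLight | utils/utils.py | merge_dicts_with_max_values
-- ===== SOURCE A (Python) =====
-- def merge_dicts_with_max_values(release_range):
--     merged_dict = {}
--
--     for lane, lane_data in release_range.items():
--         if isinstance(lane_data, dict):
--             for key, value in lane_data.items():
--                 if key in merged_dict:
--                     merged_dict[key] = max(merged_dict[key], value)
--                 else:
--                     merged_dict[key] = value
--     return merged_dict
-- ===== SOURCE B (Python) =====
-- def merge_dicts_with_max_values(release_range):
--     # Flatten all inner (key, value) pairs, list keys in first-occurrence
--     # order, then compute each key's max by a direct scan of the flat list.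
--     pairs = [(k, v)
--              for lane_data in release_range.values()
--              if isinstance(lane_data, dict)
--              for k, v in lane_data.items()]
--     keys = []
--     for k, _ in pairs:
--         if k not in keys:
--             keys.append(k)
--     return {k: max(v for kk, v in pairs if kk == k) for k in keys}
-- ===== Notes on version B (the rewrite author's own statement) =====
-- stated objective: alternative
-- what changed: B keeps no merging dict at all: it flattens every inner dict into one pair list, dedups the keys in first-occurrence order, and computes each key's max by a fresh scan of the flat list per key, instead of A's single stateful pass with a running-max dict.
import Mathlib
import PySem

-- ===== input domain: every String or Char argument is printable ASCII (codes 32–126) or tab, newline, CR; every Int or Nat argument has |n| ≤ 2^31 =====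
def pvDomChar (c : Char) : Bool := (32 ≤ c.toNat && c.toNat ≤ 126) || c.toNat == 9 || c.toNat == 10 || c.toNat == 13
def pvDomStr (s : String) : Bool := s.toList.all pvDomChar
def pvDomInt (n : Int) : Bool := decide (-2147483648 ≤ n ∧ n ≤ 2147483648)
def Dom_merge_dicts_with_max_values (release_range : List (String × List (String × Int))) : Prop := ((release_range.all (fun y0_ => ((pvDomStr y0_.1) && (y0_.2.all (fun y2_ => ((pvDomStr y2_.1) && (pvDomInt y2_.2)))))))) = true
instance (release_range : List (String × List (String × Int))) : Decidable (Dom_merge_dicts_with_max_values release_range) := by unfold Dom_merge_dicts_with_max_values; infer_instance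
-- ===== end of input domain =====

-- B keeps no merging dict: it flattens the inner pairs, dedups keys in first-occurrence order, and computes each key's max by a direct scan of the flat list (alternative decomposition, not faster).

-- ===== PORT A =====
def merge_dicts_with_max_values (release_range : List (String × List (String × Int))) : List (String × Int) :=
  -- merged_dict = {}; for lane, lane_data in release_range.items(): for key, value in lane_data.items(): ...
  -- (in this typed model every lane_data is a dict, so the isinstance branch is always taken)
  (release_range.foldl (fun merged lane =>
      lane.2.foldl (fun m kv =>
        if m.contains kv.1 then
          m.insert kv.1 (max (m.getD kv.1 0) kv.2)   -- merged_dict[key] = max(merged_dict[key], value)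
        else
          m.insert kv.1 kv.2)                        -- merged_dict[key] = value
        merged)
    (PySem.Dict.empty)).items

-- ===== PORT B =====
-- max(generator) over a (always nonempty) value list
def pvMaxOf (vs : List Int) : Int :=
  match vs with
  | [] => 0
  | h :: t => t.foldl max h

def merge_dicts_with_max_values_alt (release_range : List (String × List (String × Int))) : List (String × Int) :=
  -- pairs = [(k, v) for lane_data in release_range.values() for k, v in lane_data.items()]
  let pairs := release_range.flatMap (fun lane => lane.2)
  -- keys = []; for k, _ in pairs: if k not in keys: keys.append(k)
  let keys := pairs.foldl (fun ks kv => if ks.contains kv.1 then ks else ks ++ [kv.1]) []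
  -- {k: max(v for kk, v in pairs if kk == k) for k in keys}
  keys.map (fun k => (k, pvMaxOf ((pairs.filter (fun p => p.1 == k)).map Prod.snd)))

-- ===== PRECONDITION & SPEC =====
def Spec_merge_dicts_with_max_values (release_range : List (String × List (String × Int))) (out : List (String × Int)) : Prop := out = merge_dicts_with_max_values_alt release_range
instance (release_range : List (String × List (String × Int))) (out : List (String × Int)) : Decidable (Spec_merge_dicts_with_max_values release_range out) := by unfold Spec_merge_dicts_with_max_values; infer_instance

-- ===== CLAIM =====
def Claim_equal_merge_dicts_with_max_values : Prop := ∀ (release_range : List (String × List (String × Int))), Dom_merge_dicts_with_max_values release_range → Spec_merge_dicts_with_max_values release_range (merge_dicts_with_max_values release_range)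

-- ===== LEMMAS AND PROOFS =====

-- A's inner loop body
def pvAstep (m : PySem.Dict String Int) (kv : String × Int) : PySem.Dict String Int :=
  if m.contains kv.1 then m.insert kv.1 (max (m.getD kv.1 0) kv.2) else m.insert kv.1 kv.2

-- B's key-dedup loop and result shape
def pvKeys (l : List (String × Int)) : List String :=
  l.foldl (fun ks kv => if ks.contains kv.1 then ks else ks ++ [kv.1]) []

def pvF (l : List (String × Int)) : List (String × Int) :=
  (pvKeys l).map (fun k => (k, pvMaxOf ((l.filter (fun p => p.1 == k)).map Prod.snd)))

-- nested loop over lanes = single loop over the flattened pair list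
theorem pv_foldl_flat {α β σ : Type} (f : σ → β → σ) (g : α → List β) :
    ∀ (rr : List α) (s : σ),
      rr.foldl (fun s a => (g a).foldl f s) s = (rr.flatMap g).foldl f s := by
  intro rr
  induction rr with
  | nil => intro s; rfl
  | cons a t ih =>
    intro s
    simp [List.flatMap_cons, List.foldl_append, ih]

theorem pv_mem_keysAux (l : List (String × Int)) :
    ∀ (ks : List String) (k : String),
      k ∈ l.foldl (fun ks kv => if ks.contains kv.1 then ks else ks ++ [kv.1]) ks
        ↔ k ∈ ks ∨ k ∈ l.map Prod.fst := by
  induction l with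
  | nil => intro ks k; simp
  | cons p t ih =>
    intro ks k
    simp only [List.foldl_cons, List.map_cons, List.mem_cons]
    rw [ih]
    by_cases h : ks.contains p.1
    · simp only [if_pos h]
      constructor
      · rintro (hk | hk)
        · exact Or.inl hk
        · exact Or.inr (Or.inr hk)
      · rintro (hk | hk | hk)
        · exact Or.inl hk
        · exact Or.inl (hk ▸ (by simpa using h))
        · exact Or.inr hk
    · simp only [if_neg h, List.mem_append, List.mem_singleton]
      tauto

theorem pv_mem_pvKeys (l : List (String × Int)) (k : String) :
    k ∈ pvKeys l ↔ k ∈ l.map Prod.fst := by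
  rw [pvKeys, pv_mem_keysAux]; simp

theorem pv_nodup_keysAux (l : List (String × Int)) :
    ∀ (ks : List String), ks.Nodup →
      (l.foldl (fun ks kv => if ks.contains kv.1 then ks else ks ++ [kv.1]) ks).Nodup := by
  induction l with
  | nil => intro ks h; exact h
  | cons p t ih =>
    intro ks h
    simp only [List.foldl_cons]
    by_cases hc : ks.contains p.1
    · rw [if_pos hc]; exact ih ks h
    · rw [if_neg hc]
      refine ih _ ?_
      rw [List.nodup_append_comm]
      simp only [List.singleton_append, List.nodup_cons]
      exact ⟨fun hm => hc (List.elem_eq_true_of_mem hm), h⟩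

theorem pv_nodup_pvKeys (l : List (String × Int)) : (pvKeys l).Nodup :=
  pv_nodup_keysAux l [] List.nodup_nil

theorem pv_keys_snoc (l : List (String × Int)) (kv : String × Int) :
    pvKeys (l ++ [kv]) =
      if (pvKeys l).contains kv.1 then pvKeys l else pvKeys l ++ [kv.1] := by
  rw [pvKeys, List.foldl_append]
  rfl

theorem pv_maxOf_snoc (h : Int) (t : List Int) (v : Int) :
    pvMaxOf ((h :: t) ++ [v]) = max (pvMaxOf (h :: t)) v := by
  rw [List.cons_append]
  show (t ++ [v]).foldl max h = max (t.foldl max h) v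
  rw [List.foldl_append]
  rfl

theorem pv_keys_pvF (l : List (String × Int)) :
    (l.foldl pvAstep PySem.Dict.empty).items = pvF l →
    (l.foldl pvAstep PySem.Dict.empty).keys = pvKeys l := by
  intro h
  show (l.foldl pvAstep PySem.Dict.empty).items.map Prod.fst = pvKeys l
  rw [h, pvF, List.map_map]
  exact List.map_id _

-- main invariant: A's dict items = B's shape, over the flat pair list
theorem pv_main (l : List (String × Int)) :
    (l.foldl pvAstep PySem.Dict.empty).items = pvF l := by
  induction l using List.reverseRecOn with
  | nil => rfl
  | append_singleton l kv ih =>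
    have hkeys := pv_keys_pvF l ih
    have hnd : (l.foldl pvAstep PySem.Dict.empty).keys.Nodup := by
      rw [hkeys]; exact pv_nodup_pvKeys l
    rw [List.foldl_append, List.foldl_cons, List.foldl_nil]
    set d := l.foldl pvAstep PySem.Dict.empty with hd
    have hcont : d.contains kv.1 = true ↔ kv.1 ∈ pvKeys l := by
      rw [PySem.Dict.contains_iff_mem_keys, hkeys]
    by_cases hmem : kv.1 ∈ pvKeys l
    · -- key already present: in-place max update
      have hc : d.contains kv.1 = true := hcont.mpr hmem
      have hkc : (pvKeys l).contains kv.1 = true := List.elem_eq_true_of_mem hmem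
      -- the old stored value is the max over l's pairs with this key
      obtain ⟨h0, t0, hvals⟩ : ∃ h0 t0,
          ((l.filter (fun p => p.1 == kv.1)).map Prod.snd) = h0 :: t0 := by
        have : kv.1 ∈ l.map Prod.fst := (pv_mem_pvKeys l kv.1).mp hmem
        obtain ⟨p, hp, hpk⟩ := List.mem_map.mp this
        have : p ∈ l.filter (fun p => p.1 == kv.1) :=
          List.mem_filter.mpr ⟨hp, by simp [hpk]⟩
        cases hE : (l.filter (fun p => p.1 == kv.1)).map Prod.snd with
        | nil =>
          exact absurd (List.mem_map_of_mem this (f := Prod.snd)) (by simp [hE])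
        | cons a b => exact ⟨a, b, rfl⟩
      have hitem : (kv.1, pvMaxOf ((l.filter (fun p => p.1 == kv.1)).map Prod.snd)) ∈ d.items := by
        rw [ih, pvF]
        exact List.mem_map_of_mem hmem
      have hgetD : d.getD kv.1 0 = pvMaxOf ((l.filter (fun p => p.1 == kv.1)).map Prod.snd) :=
        PySem.Dict.getD_of_mem_items d hitem hnd 0
      rw [pvAstep, if_pos hc, PySem.Dict.items_insert_of_contains _ _ hc, ih]
      rw [pvF, pvF, pv_keys_snoc, if_pos hkc, List.map_map]
      apply List.map_congr_left
      intro k hk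
      by_cases hkeq : k = kv.1
      · subst hkeq
        simp only [Function.comp, beq_self_eq_true, if_pos]
        rw [hgetD, hvals, List.filter_append, List.map_append]
        simp only [List.filter_cons, List.filter_nil, beq_self_eq_true, if_pos]
        rw [hvals]
        show (kv.1, max (pvMaxOf (h0 :: t0)) kv.2) = (kv.1, pvMaxOf ((h0 :: t0) ++ [kv.2]))
        rw [pv_maxOf_snoc]
      · have hne : (k == kv.1) = false := by simp [hkeq]
        simp only [Function.comp, hne, Bool.false_eq_true, if_false]
        rw [List.filter_append]
        simp [Ne.symm hkeq]
    · -- fresh key: appended at the end with its own value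
      have hc : d.contains kv.1 = false := by
        cases hE : d.contains kv.1
        · rfl
        · exact absurd (hcont.mp hE) hmem
      have hkc : (pvKeys l).contains kv.1 = false := by
        cases hE : (pvKeys l).contains kv.1
        · rfl
        · exact absurd (by simpa using hE) hmem
      have hfilt : l.filter (fun p => p.1 == kv.1) = [] := by
        rw [List.filter_eq_nil_iff]
        intro p hp hb
        exact hmem ((pv_mem_pvKeys l kv.1).mpr
          (List.mem_map.mpr ⟨p, hp, by simpa using hb⟩))
      rw [pvAstep, if_neg (by rw [hc]; exact Bool.false_ne_true), PySem.Dict.items_insert_of_not_contains _ _ hc, ih]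
      rw [pvF, pvF, pv_keys_snoc, if_neg (by rw [hkc]; exact Bool.false_ne_true), List.map_append]
      congr 1
      · apply List.map_congr_left
        intro k hk
        have hkeq : k ≠ kv.1 := fun h => hmem (h ▸ hk)
        have hne : (kv.1 == k) = false := by simp [Ne.symm hkeq]
        rw [List.filter_append]
        simp [hne]
      · simp only [List.map_cons, List.map_nil]
        rw [List.filter_append, hfilt]
        simp [pvMaxOf]

-- ===== VERDICT =====
theorem merge_dicts_with_max_values_spec : Claim_equal_merge_dicts_with_max_values := by
  intro rr _
  show merge_dicts_with_max_values rr = merge_dicts_with_max_values_alt rr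
  show (rr.foldl (fun merged lane => lane.2.foldl pvAstep merged) PySem.Dict.empty).items =
    merge_dicts_with_max_values_alt rr
  rw [pv_foldl_flat pvAstep (fun lane => lane.2) rr PySem.Dict.empty, pv_main]
  rfl
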